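-- pv_equiv track=rewrite | github.com/swegger/ReadMaestro | ReadMaestro/maestro.py | _decompress_ai
-- ===== SOURCE A (Python) =====
-- from typing import NamedTuple, List, Optional, Dict, Any, Tuple, Union, Set
--
-- def _decompress_ai(compressed_data: List[int], n_channels: int) -> List[List[int]]:
--     out = [[] for _ in range(n_channels)]
--     sample_idx = 0
--     last_sample = [0] * n_channels
--     while sample_idx < len(compressed_data):
--         for channel in range(n_channels):
--             value = compressed_data[sample_idx] if sample_idx < len(compressed_data) else 0
--             if value == 0 or value == -1:
--                 # Reached end of byte array or detected end-of-data marker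
--                 return out
--             if value & 0x080:
--                 # Bit 7 is set - next dataum is 2 bytes. NOTE - We assume we're not at end of compressed bytes!
--                 temp = (((value & 0x7F) << 8) | (0x00FF & (compressed_data[sample_idx + 1]))) - 4096
--                 sample_idx += 1  # Used next byte
--                 last_sample[channel] += temp  # Datum is difference from last sample
--             else:
--                 # Bit 7 is clear - next data is 1 byte
--                 last_sample[channel] += (value - 64)  # Datum is difference from last sample
--             out[channel].append(last_sample[channel])
--             sample_idx += 1
--     return out
-- ===== SOURCE B (Python) =====
-- from typing import List
--
--
-- def _decompress_ai(compressed_data: List[int], n_channels: int) -> List[List[int]]: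
--     # Pass 1: decode the variable-width byte stream into a flat list of signed deltas.
--     deltas = []
--     i = 0
--     n = len(compressed_data)
--     while i < n:
--         v = compressed_data[i]
--         if v == 0 or v == -1:
--             break
--         if v & 0x80:
--             deltas.append((((v & 0x7F) << 8) | (compressed_data[i + 1] & 0xFF)) - 4096)
--             i += 2
--         else:
--             deltas.append(v - 64)
--             i += 1
--     # Pass 2: distribute deltas round-robin over channels, accumulating running totals.
--     out = [[] for _ in range(n_channels)]
--     running = [0] * n_channels
--     for i, d in enumerate(deltas):
--         c = i % n_channels
--         running[c] += d
--         out[c].append(running[c])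
--     return out
-- ===== Notes on version B (the rewrite author's own statement) =====
-- stated objective: alternative
-- what changed: Replaces A's interleaved while-loop with a nested per-channel for-loop by two independent passes: first decode the whole byte stream into a flat list of signed deltas, then distribute the deltas round-robin over the channels with running totals.
-- outside the precondition, e.g. on _decompress_ai([130], 1): A raises IndexError, B raises IndexError; on _decompress_ai([70], 0): A does not finish within the time limit, B raises ZeroDivisionError
import Mathlib
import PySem

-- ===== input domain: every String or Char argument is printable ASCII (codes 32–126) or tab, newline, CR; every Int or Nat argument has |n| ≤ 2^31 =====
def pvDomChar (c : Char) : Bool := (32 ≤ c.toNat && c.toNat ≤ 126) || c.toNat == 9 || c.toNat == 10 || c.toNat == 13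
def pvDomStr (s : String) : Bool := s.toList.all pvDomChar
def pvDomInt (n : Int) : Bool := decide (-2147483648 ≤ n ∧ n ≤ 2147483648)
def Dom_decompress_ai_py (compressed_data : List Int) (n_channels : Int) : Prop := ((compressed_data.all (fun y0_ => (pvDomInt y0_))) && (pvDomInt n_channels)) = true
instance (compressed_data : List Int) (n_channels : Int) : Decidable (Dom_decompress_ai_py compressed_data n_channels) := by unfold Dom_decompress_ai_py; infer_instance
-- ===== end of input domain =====

-- B replaces A's interleaved while/for channel loop by two passes: decode all deltas first, then
-- distribute them round-robin with running totals (objective: alternative decomposition, same cost).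

-- ===== PORT A =====
-- state: (out, last_sample)
-- inner `for channel in range(n_channels)` loop; `rem` channels remaining, `c` current channel.
-- `.inl` = the early `return out`; `.inr (idx, st)` = the for-loop finished normally.
-- `compressed_data[sample_idx + 1]` raises IndexError out of range in Python; the `getD _ 0`
-- stand-in is only reached outside Pre_decompress_ai_py.
def aInner (data : List Int) : Nat → Nat → Nat → (List (List Int) × List Int) →
    Sum (List (List Int)) (Nat × (List (List Int) × List Int))
  | 0, _, idx, st => .inr (idx, st)
  | rem + 1, c, idx, st =>
    let value := if idx < data.length then data.getD idx 0 else 0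
    if value = 0 ∨ value = -1 then .inl st.1
    else if PySem.Int.band value 128 ≠ 0 then
      let temp := PySem.Int.bor ((PySem.Int.band value 127) <<< (8 : Nat))
                    (PySem.Int.band 255 (data.getD (idx + 1) 0)) - 4096
      let v := st.2.getD c 0 + temp
      aInner data rem (c + 1) (idx + 2) (st.1.modify c (· ++ [v]), st.2.set c v)
    else
      let v := st.2.getD c 0 + (value - 64)
      aInner data rem (c + 1) (idx + 1) (st.1.modify c (· ++ [v]), st.2.set c v)

-- outer `while sample_idx < len(compressed_data)` loop; `fuel` only makes the recursion total
-- (sample_idx strictly increases each round whenever n_channels ≥ 1, so fuel = length + 1 is never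
-- exhausted under Pre_; with n_channels ≤ 0 and nonempty data Python diverges — excluded by Pre_).
def aOuter (data : List Int) (n : Nat) : Nat → Nat → (List (List Int) × List Int) → List (List Int)
  | 0, _, st => st.1
  | fuel + 1, idx, st =>
    if idx < data.length then
      match aInner data n 0 idx st with
      | .inl res => res
      | .inr (idx', st') => aOuter data n fuel idx' st'
    else st.1

def decompress_ai_py (compressed_data : List Int) (n_channels : Int) : List (List Int) :=
  aOuter compressed_data n_channels.toNat (compressed_data.length + 1) 0
    (List.replicate n_channels.toNat [], List.replicate n_channels.toNat 0)

-- ===== PORT B =====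
-- pass 1 of Source B: the `while i < n` decode loop, as structural recursion on the suffix at i.
-- `compressed_data[i + 1]` raises IndexError in Python when the tail is empty; that branch
-- (`=> []`) is only reached outside Pre_decompress_ai_py.
def bDecode : List Int → List Int
  | [] => []
  | v :: rest =>
    if v = 0 ∨ v = -1 then []
    else if PySem.Int.band v 128 ≠ 0 then
      match rest with
      | [] => []
      | w :: rest' =>
        (PySem.Int.bor ((PySem.Int.band v 127) <<< (8 : Nat)) (PySem.Int.band w 255) - 4096)
          :: bDecode rest'
    else (v - 64) :: bDecode rest

-- pass 2 of Source B: `for i, d in enumerate(deltas)` with c = i % n_channels (i ≥ 0 and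
-- n_channels > 0 under Pre_, so Python's % is Nat.mod here).
def bDistrib (n : Nat) : Nat → (List (List Int) × List Int) → List Int →
    (List (List Int) × List Int)
  | _, st, [] => st
  | i, st, d :: ds =>
    let c := i % n
    let v := st.2.getD c 0 + d
    bDistrib n (i + 1) (st.1.modify c (· ++ [v]), st.2.set c v) ds

def decompress_ai_py_alt (compressed_data : List Int) (n_channels : Int) : List (List Int) :=
  (bDistrib n_channels.toNat 0
    (List.replicate n_channels.toNat [], List.replicate n_channels.toNat 0)
    (bDecode compressed_data)).1

-- ===== PRECONDITION & SPEC =====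
-- shape of a well-formed compressed stream: scanning datum by datum (skipping the second byte of a
-- two-byte datum, stopping at a 0 / -1 terminator) never leaves a bit-7 first byte as the very
-- last element.  Exactly on such truncated streams A (and B) raise IndexError; and with
-- n_channels ≤ 0 and nonempty data A's while loop never terminates — Pre_ excludes both.
def wfStream : List Int → Bool
  | [] => true
  | v :: rest =>
    if v = 0 ∨ v = -1 then true
    else if PySem.Int.band v 128 ≠ 0 then
      match rest with
      | [] => false
      | _ :: rest' => wfStream rest'
    else wfStream rest

def Pre_decompress_ai_py (compressed_data : List Int) (n_channels : Int) : Prop :=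
  (0 < n_channels ∨ compressed_data = []) ∧ wfStream compressed_data = true

instance (compressed_data : List Int) (n_channels : Int) :
    Decidable (Pre_decompress_ai_py compressed_data n_channels) := by
  unfold Pre_decompress_ai_py; infer_instance

def pvWitness_decompress_ai_py : List Int × Int := ([70, 130, 5, 90, 0], 2)

def Spec_decompress_ai_py (compressed_data : List Int) (n_channels : Int) (out : List (List Int)) : Prop := out = decompress_ai_py_alt compressed_data n_channels
instance (compressed_data : List Int) (n_channels : Int) (out : List (List Int)) : Decidable (Spec_decompress_ai_py compressed_data n_channels out) := by unfold Spec_decompress_ai_py; infer_instance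

-- ===== CLAIM (what is proved, stated in full; the proofs are below) =====
def Claim_equal_decompress_ai_py : Prop := ∀ (compressed_data : List Int) (n_channels : Int), Dom_decompress_ai_py compressed_data n_channels → Pre_decompress_ai_py compressed_data n_channels → Spec_decompress_ai_py compressed_data n_channels (decompress_ai_py compressed_data n_channels)

-- ===== LEMMAS AND PROOFS =====

lemma bDistrib_append (n : Nat) (xs ys : List Int) :
    ∀ (i : Nat) (st : List (List Int) × List Int),
      bDistrib n i st (xs ++ ys) = bDistrib n (i + xs.length) (bDistrib n i st xs) ys := by
  induction xs with
  | nil => intro i st; simp [bDistrib]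
  | cons d xs ih =>
      intro i st
      simp only [List.cons_append, bDistrib, ih, List.length_cons]
      ring_nf

lemma bDistrib_mod (n : Nat) (ds : List Int) :
    ∀ (i : Nat) (st : List (List Int) × List Int),
      bDistrib n (i + n) st ds = bDistrib n i st ds := by
  induction ds with
  | nil => intro i st; simp [bDistrib]
  | cons d ds ih =>
      intro i st
      simp only [bDistrib, Nat.add_mod_right]
      rw [show i + n + 1 = (i + 1) + n by ring, ih]

-- step lemmas for aInner / bDecode in each branch
lemma aInner_end (data : List Int) (rem c idx : Nat) (st : List (List Int) × List Int)
    (h : ¬ idx < data.length) :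
    aInner data (rem + 1) c idx st = .inl st.1 := by
  simp [aInner, h]

lemma aInner_term (data : List Int) (rem c idx : Nat) (st : List (List Int) × List Int)
    (h : idx < data.length) (ht : data[idx] = 0 ∨ data[idx] = -1) :
    aInner data (rem + 1) c idx st = .inl st.1 := by
  have hget : data.getD idx 0 = data[idx] := List.getD_eq_getElem data 0 h
  simp only [aInner, if_pos h, hget]
  rw [if_pos ht]

lemma aInner_two (data : List Int) (rem c idx : Nat) (st : List (List Int) × List Int)
    (h : idx < data.length) (ht : ¬ (data[idx] = 0 ∨ data[idx] = -1))
    (hb : PySem.Int.band data[idx] 128 ≠ 0) :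
    aInner data (rem + 1) c idx st =
      aInner data rem (c + 1) (idx + 2)
        (let v := st.2.getD c 0 +
            (PySem.Int.bor ((PySem.Int.band data[idx] 127) <<< (8 : Nat))
              (PySem.Int.band 255 (data.getD (idx + 1) 0)) - 4096)
         (st.1.modify c (· ++ [v]), st.2.set c v)) := by
  have hget : data.getD idx 0 = data[idx] := List.getD_eq_getElem data 0 h
  simp only [aInner, if_pos h, hget]
  rw [if_neg ht, if_pos hb]

lemma aInner_one (data : List Int) (rem c idx : Nat) (st : List (List Int) × List Int)
    (h : idx < data.length) (ht : ¬ (data[idx] = 0 ∨ data[idx] = -1))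
    (hb : ¬ PySem.Int.band data[idx] 128 ≠ 0) :
    aInner data (rem + 1) c idx st =
      aInner data rem (c + 1) (idx + 1)
        (let v := st.2.getD c 0 + (data[idx] - 64)
         (st.1.modify c (· ++ [v]), st.2.set c v)) := by
  have hget : data.getD idx 0 = data[idx] := List.getD_eq_getElem data 0 h
  simp only [aInner, if_pos h, hget]
  rw [if_neg ht, if_neg hb]

lemma bDecode_term (v : Int) (rest : List Int) (ht : v = 0 ∨ v = -1) :
    bDecode (v :: rest) = [] := by
  rw [bDecode.eq_def]; simp only []; rw [if_pos ht]

lemma bDecode_two (v w : Int) (rest : List Int) (ht : ¬ (v = 0 ∨ v = -1))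
    (hb : PySem.Int.band v 128 ≠ 0) :
    bDecode (v :: w :: rest) =
      (PySem.Int.bor ((PySem.Int.band v 127) <<< (8 : Nat)) (PySem.Int.band w 255) - 4096)
        :: bDecode rest := by
  rw [bDecode.eq_def]; simp only []; rw [if_neg ht, if_pos hb]

lemma bDecode_one (v : Int) (rest : List Int) (ht : ¬ (v = 0 ∨ v = -1))
    (hb : ¬ PySem.Int.band v 128 ≠ 0) :
    bDecode (v :: rest) = (v - 64) :: bDecode rest := by
  rw [bDecode.eq_def]; simp only []; rw [if_neg ht, if_neg hb]

lemma wf_two (v w : Int) (rest : List Int) (ht : ¬ (v = 0 ∨ v = -1))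
    (hb : PySem.Int.band v 128 ≠ 0) (h : wfStream (v :: w :: rest) = true) :
    wfStream rest = true := by
  rw [wfStream.eq_def] at h; simp only [] at h; rw [if_neg ht, if_pos hb] at h; exact h

lemma wf_two_nonnil (v : Int) (ht : ¬ (v = 0 ∨ v = -1))
    (hb : PySem.Int.band v 128 ≠ 0) : wfStream [v] = false := by
  rw [wfStream.eq_def]; simp only []; rw [if_neg ht, if_pos hb]

lemma wf_one (v : Int) (rest : List Int) (ht : ¬ (v = 0 ∨ v = -1))
    (hb : ¬ PySem.Int.band v 128 ≠ 0) (h : wfStream (v :: rest) = true) :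
    wfStream rest = true := by
  rw [wfStream.eq_def] at h; simp only [] at h; rw [if_neg ht, if_neg hb] at h; exact h

-- aInner with c + rem = n behaves like bDistrib from counter c on the decoded suffix.
lemma aInner_spec (data : List Int) (n : Nat) :
    ∀ (rem c : Nat) (idx : Nat) (st : List (List Int) × List Int),
      c + rem = n → wfStream (data.drop idx) = true →
      (if (bDecode (data.drop idx)).length < rem then
        aInner data rem c idx st = .inl (bDistrib n c st (bDecode (data.drop idx))).1
      else ∃ idx',
        aInner data rem c idx st =
          .inr (idx', bDistrib n c st ((bDecode (data.drop idx)).take rem)) ∧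
        bDecode (data.drop idx') = (bDecode (data.drop idx)).drop rem ∧
        wfStream (data.drop idx') = true ∧ idx + rem ≤ idx') := by
  intro rem
  induction rem with
  | zero =>
      intro c idx st _ hwf
      simp only [Nat.not_lt_zero, if_false, List.take_zero, List.drop_zero]
      exact ⟨idx, by simp [aInner, bDistrib], rfl, hwf, by omega⟩
  | succ rem ih =>
      intro c idx st hcn hwf
      have hcn' : c < n := by omega
      have hcmod : c % n = c := Nat.mod_eq_of_lt hcn'
      by_cases hidx : idx < data.length
      · have hdrop : data.drop idx = data[idx] :: data.drop (idx + 1) :=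
          List.drop_eq_getElem_cons hidx
        by_cases hterm : data[idx] = 0 ∨ data[idx] = -1
        · -- terminator: both stop
          have hdec : bDecode (data.drop idx) = [] := by
            rw [hdrop]; exact bDecode_term _ _ hterm
          rw [aInner_term data rem c idx st hidx hterm]
          simp [hdec, bDistrib]
        · by_cases hbit : PySem.Int.band data[idx] 128 ≠ 0
          · -- two-byte datum
            by_cases hidx1 : idx + 1 < data.length
            · have hdrop1 : data.drop (idx + 1) = data[idx + 1] :: data.drop (idx + 2) :=
                List.drop_eq_getElem_cons hidx1
              have hwf2 : wfStream (data.drop (idx + 2)) = true := by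
                rw [hdrop, hdrop1] at hwf
                exact wf_two _ _ _ hterm hbit hwf
              have hget1 : data.getD (idx + 1) 0 = data[idx + 1] :=
                List.getD_eq_getElem data 0 hidx1
              set dv : Int := PySem.Int.bor ((PySem.Int.band data[idx] 127) <<< (8 : Nat))
                  (PySem.Int.band data[idx + 1] 255) - 4096 with hdv
              have hdec : bDecode (data.drop idx) = dv :: bDecode (data.drop (idx + 2)) := by
                rw [hdrop, hdrop1]; exact bDecode_two _ _ _ hterm hbit
              set v0 : Int := st.2.getD c 0 + dv with hv0
              set st2 : List (List Int) × List Int :=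
                (st.1.modify c (· ++ [v0]), st.2.set c v0) with hst2
              have hstep : aInner data (rem + 1) c idx st = aInner data rem (c + 1) (idx + 2) st2 := by
                rw [aInner_two data rem c idx st hidx hterm hbit]
                simp only [hget1, PySem.Int.band_comm 255 (data[idx + 1])]
                rfl
              have hbdt : ∀ tl, bDistrib n c st (dv :: tl) = bDistrib n (c + 1) st2 tl := by
                intro tl; simp only [bDistrib, hcmod]; rfl
              have := ih (c + 1) (idx + 2) st2 (by omega) hwf2
              by_cases hlen : (bDecode (data.drop (idx + 2))).length < rem
              · rw [if_pos hlen] at this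
                rw [if_pos (by rw [hdec]; simpa using Nat.succ_lt_succ hlen)]
                rw [hstep, this, hdec, hbdt]
              · rw [if_neg hlen] at this
                obtain ⟨idx', heq, hd, hw, hle⟩ := this
                rw [if_neg (by rw [hdec]; simp; omega)]
                refine ⟨idx', ?_, ?_, hw, by omega⟩
                · rw [hstep, heq, hdec, List.take_succ_cons, hbdt]
                · rw [hd, hdec, List.drop_succ_cons]
            · -- trailing two-byte first byte: excluded by wfStream
              exfalso
              have hnil : data.drop (idx + 1) = [] := List.drop_eq_nil_of_le (by omega)
              rw [hdrop, hnil] at hwf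
              rw [show (data[idx] :: [] : List Int) = [data[idx]] from rfl] at hwf
              rw [wf_two_nonnil _ hterm hbit] at hwf
              exact Bool.false_ne_true hwf
          · -- one-byte datum
            have hwf1 : wfStream (data.drop (idx + 1)) = true := by
              rw [hdrop] at hwf
              exact wf_one _ _ hterm hbit hwf
            set dv : Int := data[idx] - 64 with hdv
            have hdec : bDecode (data.drop idx) = dv :: bDecode (data.drop (idx + 1)) := by
              rw [hdrop]; exact bDecode_one _ _ hterm hbit
            set v0 : Int := st.2.getD c 0 + dv with hv0
            set st2 : List (List Int) × List Int :=
              (st.1.modify c (· ++ [v0]), st.2.set c v0) with hst2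
            have hstep : aInner data (rem + 1) c idx st = aInner data rem (c + 1) (idx + 1) st2 := by
              rw [aInner_one data rem c idx st hidx hterm hbit]
            have hbdt : ∀ tl, bDistrib n c st (dv :: tl) = bDistrib n (c + 1) st2 tl := by
              intro tl; simp only [bDistrib, hcmod]; rfl
            have := ih (c + 1) (idx + 1) st2 (by omega) hwf1
            by_cases hlen : (bDecode (data.drop (idx + 1))).length < rem
            · rw [if_pos hlen] at this
              rw [if_pos (by rw [hdec]; simpa using Nat.succ_lt_succ hlen)]
              rw [hstep, this, hdec, hbdt]
            · rw [if_neg hlen] at this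
              obtain ⟨idx', heq, hd, hw, hle⟩ := this
              rw [if_neg (by rw [hdec]; simp; omega)]
              refine ⟨idx', ?_, ?_, hw, by omega⟩
              · rw [hstep, heq, hdec, List.take_succ_cons, hbdt]
              · rw [hd, hdec, List.drop_succ_cons]
      · -- idx beyond end: value = 0, early return with empty decode
        have hdrop : data.drop idx = [] := List.drop_eq_nil_of_le (by omega)
        rw [aInner_end data rem c idx st hidx]
        simp [hdrop, bDecode, bDistrib]

lemma aOuter_spec (data : List Int) (n : Nat) (hn : 0 < n) :
    ∀ (fuel idx : Nat) (st : List (List Int) × List Int),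
      data.length - idx < fuel → wfStream (data.drop idx) = true →
      aOuter data n fuel idx st = (bDistrib n 0 st (bDecode (data.drop idx))).1 := by
  intro fuel
  induction fuel with
  | zero => intro idx st h; omega
  | succ fuel ih =>
      intro idx st hfuel hwf
      by_cases hidx : idx < data.length
      · have h := aInner_spec data n n 0 idx st (by omega) hwf
        by_cases hlen : (bDecode (data.drop idx)).length < n
        · rw [if_pos hlen] at h
          simp [aOuter, hidx, h]
        · rw [if_neg hlen] at h
          obtain ⟨idx', heq, hdec, hwf', hle⟩ := h
          have hst : aOuter data n (fuel + 1) idx st =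
              aOuter data n fuel idx' (bDistrib n 0 st ((bDecode (data.drop idx)).take n)) := by
            simp [aOuter, hidx, heq]
          rw [hst, ih idx' _ (by omega) hwf', hdec]
          conv_rhs => rw [← List.take_append_drop n (bDecode (data.drop idx))]
          rw [bDistrib_append]
          have hlen' : ((bDecode (data.drop idx)).take n).length = n := by
            simp; omega
          rw [hlen', show (0 : Nat) + n = 0 + n from rfl, bDistrib_mod]
      · have hdrop : data.drop idx = [] := List.drop_eq_nil_of_le (by omega)
        simp [aOuter, hidx, hdrop, bDecode, bDistrib]

-- ===== VERDICT (by name: the statement is the Claim_ definition above) =====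
theorem decompress_ai_py_spec : Claim_equal_decompress_ai_py := by
  intro data n _ hpre
  unfold Spec_decompress_ai_py decompress_ai_py decompress_ai_py_alt
  obtain ⟨hn | hnil, hwf⟩ := hpre
  · have hn' : 0 < n.toNat := by omega
    exact aOuter_spec data n.toNat hn' (data.length + 1) 0 _ (by omega) (by simpa using hwf)
  · subst hnil
    simp [aOuter, bDecode, bDistrib]
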